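-- pv_equiv track=rewrite | github.com/JordanAlexanderWright/codingproblems | day2/day_2_main.py | motion_tracker
-- ===== SOURCE A (Python) =====
-- def motion_tracker(data):
--     horizontal = 0
--     vertical = 0
--     for data_point in data:
--         direction = data_point[0]
--         movement_value = data_point[1]
--
--         match direction:
--             case 'forward':
--                 horizontal += movement_value
--             case 'down':
--                 vertical += movement_value
--             case 'up':
--                 vertical -= movement_value
--
--     return horizontal, vertical
-- ===== SOURCE B (Python) =====
-- def motion_tracker(data):
--     horizontal = sum(v for d, v in data if d == 'forward')
--     vertical = sum(v for d, v in data if d == 'down') - sum(v for d, v in data if d == 'up')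
--     return horizontal, vertical
-- ===== Notes on version B (the rewrite author's own statement) =====
-- stated objective: simpler
-- what changed: Replaces the single branch-dispatching accumulator loop with three filtered sums (forward, down, up) combined arithmetically.
import Mathlib
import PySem

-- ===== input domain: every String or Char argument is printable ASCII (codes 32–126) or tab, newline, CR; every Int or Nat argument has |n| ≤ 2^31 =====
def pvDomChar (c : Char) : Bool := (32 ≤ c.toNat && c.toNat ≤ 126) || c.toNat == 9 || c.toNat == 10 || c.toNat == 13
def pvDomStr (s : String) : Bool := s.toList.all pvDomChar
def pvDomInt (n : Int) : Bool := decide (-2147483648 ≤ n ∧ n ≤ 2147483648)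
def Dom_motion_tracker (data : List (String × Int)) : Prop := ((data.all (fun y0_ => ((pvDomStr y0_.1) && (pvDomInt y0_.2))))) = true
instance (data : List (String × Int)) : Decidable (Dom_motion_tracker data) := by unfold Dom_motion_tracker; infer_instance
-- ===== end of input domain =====

-- ===== PORT A =====
-- B replaces one branching loop by three filtered sums; behaviour proved equal on all inputs.
def motion_tracker (data : List (String × Int)) : Int × Int :=
  data.foldl (fun (hv : Int × Int) data_point =>
    let direction := data_point.1
    let movement_value := data_point.2
    if direction = "forward" then (hv.1 + movement_value, hv.2)
    else if direction = "down" then (hv.1, hv.2 + movement_value)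
    else if direction = "up" then (hv.1, hv.2 - movement_value)
    else hv) (0, 0)

-- ===== PORT B =====
def motion_tracker_alt (data : List (String × Int)) : Int × Int :=
  let horizontal := ((data.filter (fun p => p.1 = "forward")).map (·.2)).sum
  let vertical := ((data.filter (fun p => p.1 = "down")).map (·.2)).sum
                  - ((data.filter (fun p => p.1 = "up")).map (·.2)).sum
  (horizontal, vertical)

-- ===== PRECONDITION & SPEC =====
def Spec_motion_tracker (data : List (String × Int)) (out : Int × Int) : Prop := out = motion_tracker_alt data
instance (data : List (String × Int)) (out : Int × Int) : Decidable (Spec_motion_tracker data out) := by unfold Spec_motion_tracker; infer_instance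

-- ===== CLAIM (what is proved, stated in full; the proofs are below) =====
def Claim_equal_motion_tracker : Prop := ∀ (data : List (String × Int)), Dom_motion_tracker data → Spec_motion_tracker data (motion_tracker data)

-- ===== LEMMAS AND PROOFS =====

-- ===== VERDICT (by name: the statement is the Claim_ definition above) =====
theorem mt_loop (data : List (String × Int)) (h v : Int) :
    data.foldl (fun (hv : Int × Int) data_point =>
      let direction := data_point.1
      let movement_value := data_point.2
      if direction = "forward" then (hv.1 + movement_value, hv.2)
      else if direction = "down" then (hv.1, hv.2 + movement_value)
      else if direction = "up" then (hv.1, hv.2 - movement_value)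
      else hv) (h, v)
    = (h + ((data.filter (fun p => p.1 = "forward")).map (·.2)).sum,
       v + ((data.filter (fun p => p.1 = "down")).map (·.2)).sum
         - ((data.filter (fun p => p.1 = "up")).map (·.2)).sum) := by
  induction data generalizing h v with
  | nil => simp
  | cons p rest ih =>
    simp only [List.foldl_cons]
    split_ifs with h1 h2 h3 <;>
      simp only [ih, List.filter_cons, h1, List.map_cons, List.sum_cons] <;>
      (try simp [h1, h2]) <;> (try simp [h1, h2, h3]) <;> ring_nf <;>
      simp_all <;> ring

theorem motion_tracker_spec : Claim_equal_motion_tracker := by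
  intro data _
  unfold Spec_motion_tracker motion_tracker motion_tracker_alt
  rw [mt_loop]
  simp
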